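-- pv_equiv track=rewrite | github.com/strubloid/.bash_aliases | scripts/helpers/time_extractor.py | remove_time_from_transcription
-- ===== SOURCE A (Python) =====
-- def remove_time_from_transcription(transcription, start_time):
--     """
--     Remove all content from the transcription starting at the given time value and forward.
--     Keep only the content before that point.
--     """
--     if not start_time:
--         return transcription
--
--     # Split the transcription into lines
--     lines = transcription.split('\n')
--
--     # Find the line that contains the start time
--     filtered_lines = []
--     time_found = False
--
--     for line in lines:
--         if start_time in line:
--             time_found = True
--             # Add this line but don't add anything after it
--             filtered_lines.append(line)
--             break
--         elif not time_found:
--             filtered_lines.append(line)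
--
--     # If we didn't find the time, return original transcription
--     if not time_found:
--         return transcription
--
--     return '\n'.join(filtered_lines)
-- ===== SOURCE B (Python) =====
-- def remove_time_from_transcription(transcription, start_time):
--     """
--     Remove all content from the transcription starting at the given time value and forward.
--     Keep only the content before that point.
--     (Same result as the line-splitting version; works on the raw string, no line list.)
--     """
--     # A needle that is empty or spans a newline can never match inside a single line.
--     if not start_time or '\n' in start_time:
--         return transcription
--     pos = transcription.find(start_time)
--     if pos == -1:
--         return transcription
--     # Keep everything up to the end of the line containing the first occurrence
--     nl = transcription.find('\n', pos)
--     return transcription if nl == -1 else transcription[:nl]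
-- ===== Notes on version B (the rewrite author's own statement) =====
-- stated objective: alternative
-- what changed: Instead of splitting the transcription into a line list and scanning it with a found-flag loop then re-joining, B works on the raw string: one find() for the needle, one find() for the following newline, and a single slice; no line list is built.
import Mathlib
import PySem

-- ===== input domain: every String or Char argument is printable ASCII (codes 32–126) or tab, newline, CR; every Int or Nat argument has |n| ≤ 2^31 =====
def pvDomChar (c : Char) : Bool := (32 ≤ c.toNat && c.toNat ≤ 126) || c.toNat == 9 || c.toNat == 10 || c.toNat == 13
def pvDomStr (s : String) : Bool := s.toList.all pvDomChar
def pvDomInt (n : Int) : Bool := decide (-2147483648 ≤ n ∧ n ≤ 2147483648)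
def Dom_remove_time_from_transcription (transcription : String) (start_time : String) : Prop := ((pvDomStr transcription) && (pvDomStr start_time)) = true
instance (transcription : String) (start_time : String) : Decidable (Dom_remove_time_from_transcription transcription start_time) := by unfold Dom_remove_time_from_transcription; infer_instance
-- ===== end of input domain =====

-- B computes the same truncation on the raw string (one find() for the needle, one
-- find() for the next newline, one slice) instead of splitting into a line list,
-- scanning it with a found flag and re-joining: an alternative decomposition.

-- ===== PORT A =====
-- the 'for line in lines: … break' loop of A, with its filtered list and found flag
def pvLoopA (start_time : List Char) (lines : List (List Char))
    (filtered : List (List Char)) (found : Bool) : List (List Char) × Bool :=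
  match lines with
  | [] => (filtered, found)
  | line :: rest =>
    if PySem.Chars.isIn start_time line then (filtered ++ [line], true)
    else if found = false then pvLoopA start_time rest (filtered ++ [line]) found
    else pvLoopA start_time rest filtered found

def remove_time_from_transcription (transcription : String) (start_time : String) : String :=
  if start_time.toList.isEmpty then transcription
  else
    let lines := PySem.Chars.splitOn transcription.toList ['\n']
    let res := pvLoopA start_time.toList lines [] false
    if res.2 = false then transcription
    else String.ofList (PySem.Chars.join ['\n'] res.1)

-- ===== PORT B =====
def remove_time_from_transcription_alt (transcription : String) (start_time : String) : String :=
  if start_time.toList.isEmpty || PySem.Chars.isIn ['\n'] start_time.toList then transcription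
  else
    let pos := PySem.Chars.find transcription.toList start_time.toList
    if pos = -1 then transcription
    else
      let nl := PySem.Chars.findFrom transcription.toList ['\n'] pos none
      if nl = -1 then transcription
      else String.ofList (PySem.List.slice transcription.toList none (some nl))

-- ===== PRECONDITION & SPEC =====
def Spec_remove_time_from_transcription (transcription : String) (start_time : String) (out : String) : Prop := out = remove_time_from_transcription_alt transcription start_time
instance (transcription : String) (start_time : String) (out : String) : Decidable (Spec_remove_time_from_transcription transcription start_time out) := by unfold Spec_remove_time_from_transcription; infer_instance

-- ===== CLAIM (what is proved, stated in full; the proofs are below) =====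
def Claim_equal_remove_time_from_transcription : Prop := ∀ (transcription : String) (start_time : String), Dom_remove_time_from_transcription transcription start_time → Spec_remove_time_from_transcription transcription start_time (remove_time_from_transcription transcription start_time)

-- ===== LEMMAS AND PROOFS =====

-- splitOn t ['\n'] in structural form
def pvLines : List Char → List (List Char)
  | [] => [[]]
  | c :: rest =>
    if c = '\n' then [] :: pvLines rest
    else
      match pvLines rest with
      | [] => [[c]]
      | h :: tl => (c :: h) :: tl

-- list-level bodies of the two ports (past their guards)
def pvAOut (s t : List Char) : List Char :=
  if (pvLoopA s (pvLines t) [] false).2 = false then t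
  else PySem.Chars.join ['\n'] (pvLoopA s (pvLines t) [] false).1

def pvBOut (s t : List Char) : List Char :=
  if PySem.Chars.find t s = -1 then t
  else if PySem.Chars.findFrom t ['\n'] (PySem.Chars.find t s) none = -1 then t
  else PySem.List.slice t none (some (PySem.Chars.findFrom t ['\n'] (PySem.Chars.find t s) none))

theorem pvLines_ne_nil (t : List Char) : pvLines t ≠ [] := by
  cases t with
  | nil => simp [pvLines]
  | cons c rest =>
    simp only [pvLines]
    split
    · simp
    · split <;> simp

theorem pvSplitOn_go_eq (fuel : Nat) : ∀ (l cur : List Char) (acc : List (List Char)),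
    l.length < fuel →
    PySem.Chars.splitOn.go ['\n'] fuel l cur acc =
      acc.reverse ++ (match pvLines l with
        | [] => []
        | h :: tl => (cur.reverse ++ h) :: tl) := by
  induction fuel with
  | zero => intro l cur acc h; omega
  | succ fuel IH =>
    intro l cur acc h
    cases l with
    | nil =>
      simp [PySem.Chars.splitOn.go, pvLines]
    | cons c rest =>
      obtain ⟨h', tl', hE⟩ : ∃ h' tl', pvLines rest = h' :: tl' := by
        cases e : pvLines rest with
        | nil => exact absurd e (pvLines_ne_nil rest)
        | cons x xs => exact ⟨x, xs, rfl⟩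
      have hlen : rest.length < fuel := by simpa using h
      by_cases hc : c = '\n'
      · subst hc
        rw [PySem.Chars.splitOn.go]
        simp only [List.isPrefixOf, beq_self_eq_true, Bool.true_and, if_pos]
        rw [show List.drop (['\n'].length) ('\n' :: rest) = rest from rfl]
        rw [IH rest [] (List.reverse cur :: acc) hlen]
        simp [pvLines, hE]
      · rw [PySem.Chars.splitOn.go]
        have hpre : ['\n'].isPrefixOf (c :: rest) = false := by
          simp [List.isPrefixOf]
          exact fun hcc => absurd hcc.symm hc
        rw [hpre]
        simp only [Bool.false_eq_true, if_false]
        rw [IH rest (c :: cur) acc hlen]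
        simp [pvLines, hc, hE, List.append_assoc]

theorem pvSplitOn_eq_pvLines (t : List Char) :
    PySem.Chars.splitOn t ['\n'] = pvLines t := by
  obtain ⟨h', tl', hE⟩ : ∃ h' tl', pvLines t = h' :: tl' := by
    cases e : pvLines t with
    | nil => exact absurd e (pvLines_ne_nil t)
    | cons x xs => exact ⟨x, xs, rfl⟩
  show PySem.Chars.splitOn.go ['\n'] (t.length + 1) t [] [] = pvLines t
  rw [pvSplitOn_go_eq (t.length + 1) t [] [] (by omega)]
  simp [hE]

theorem pvLines_no_nl (t : List Char) : ∀ l ∈ pvLines t, '\n' ∉ l := by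
  induction t with
  | nil => intro l hl; simp [pvLines] at hl; simp [hl]
  | cons c rest IH =>
    intro l hl
    by_cases hc : c = '\n'
    · subst hc
      rw [show pvLines ('\n' :: rest) = [] :: pvLines rest from by simp [pvLines]] at hl
      rcases List.mem_cons.mp hl with h1 | h2
      · simp [h1]
      · exact IH l h2
    · simp only [pvLines, if_neg hc] at hl
      cases e : pvLines rest with
      | nil => exact absurd e (pvLines_ne_nil rest)
      | cons x xs =>
        rw [e] at hl
        rcases List.mem_cons.mp hl with h1 | h2
        · subst h1
          intro hmem
          rcases List.mem_cons.mp hmem with h3 | h4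
          · exact hc h3.symm
          · exact IH x (by rw [e]; exact List.mem_cons_self) h4
        · exact IH l (by rw [e]; exact List.mem_cons_of_mem x h2)

theorem pvLines_of_not_mem (t : List Char) (h : '\n' ∉ t) : pvLines t = [t] := by
  induction t with
  | nil => rfl
  | cons c rest IH =>
    have hc : c ≠ '\n' := fun hcc => h (by simp [hcc])
    have hrest : '\n' ∉ rest := fun hm => h (List.mem_cons_of_mem c hm)
    simp only [pvLines, if_neg hc, IH hrest]

theorem pvLines_append (a r : List Char) (h : '\n' ∉ a) :
    pvLines (a ++ '\n' :: r) = a :: pvLines r := by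
  induction a with
  | nil => simp [pvLines]
  | cons c a' IH =>
    have hc : c ≠ '\n' := fun hcc => h (by simp [hcc])
    have ha' : '\n' ∉ a' := fun hm => h (List.mem_cons_of_mem c hm)
    simp only [List.cons_append, pvLines, if_neg hc, IH ha']

theorem pvLoopA_acc (s : List Char) (L : List (List Char)) (acc : List (List Char)) :
    pvLoopA s L acc false = (acc ++ (pvLoopA s L [] false).1, (pvLoopA s L [] false).2) := by
  induction L generalizing acc with
  | nil => simp [pvLoopA]
  | cons l rest IH =>
    by_cases hl : PySem.Chars.isIn s l = true
    · simp [pvLoopA, hl]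
    · rw [Bool.not_eq_true] at hl
      simp [pvLoopA, hl, IH (acc ++ [l]), IH [l], List.append_assoc]

theorem pvLoopA_all_false (s : List Char) (L : List (List Char)) (acc : List (List Char))
    (h : ∀ l ∈ L, PySem.Chars.isIn s l = false) :
    pvLoopA s L acc false = (acc ++ L, false) := by
  induction L generalizing acc with
  | nil => simp [pvLoopA]
  | cons l rest IH =>
    have hl := h l List.mem_cons_self
    simp [pvLoopA, hl, IH (acc ++ [l]) (fun x hx => h x (List.mem_cons_of_mem l hx)), List.append_assoc]

theorem pvLoopA_fst_ne_nil (s : List Char) (L : List (List Char)) (acc : List (List Char))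
    (h : (pvLoopA s L acc false).2 = true) : (pvLoopA s L acc false).1 ≠ [] := by
  induction L generalizing acc with
  | nil => simp [pvLoopA] at h
  | cons l rest IH =>
    by_cases hl : PySem.Chars.isIn s l = true
    · simp [pvLoopA, hl]
    · rw [Bool.not_eq_true] at hl
      simp only [pvLoopA, hl, Bool.false_eq_true, if_false, if_true] at h ⊢
      exact IH (acc ++ [l]) h

-- [c] is a prefix exactly of lists starting with c
theorem pvSingleton_prefix (c : Char) (w : List Char) : [c] <+: w ↔ w.head? = some c := by
  cases w with
  | nil => simp
  | cons d w' =>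
    constructor
    · intro hp
      rcases List.cons_prefix_cons.mp hp with ⟨h1, _⟩
      simp [h1]
    · intro hh
      have : d = c := by simpa using hh
      subst this
      exact List.cons_prefix_cons.mpr ⟨rfl, List.nil_prefix⟩

-- first occurrence of a character after a clean block
theorem pvFindChar (c : Char) (u v : List Char) (h : c ∉ u) :
    PySem.Chars.find (u ++ c :: v) [c] = (u.length : Int) := by
  have hmem : c ∈ u ++ c :: v := List.mem_append.mpr (Or.inr List.mem_cons_self)
  have hinf : [c] <:+: u ++ c :: v := (List.singleton_infix_iff c (u ++ c :: v)).mpr hmem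
  have hf0 : 0 ≤ PySem.Chars.find (u ++ c :: v) [c] := by
    rw [PySem.Chars.find_nonneg_iff]; exact hinf
  obtain ⟨hpre, hmin⟩ := PySem.Chars.find_spec hf0
  set f := (PySem.Chars.find (u ++ c :: v) [c]).toNat with hfdef
  have hne : f = u.length := by
    rcases Nat.lt_trichotomy f u.length with hlt | heq | hgt
    · exfalso
      have h1 : ((u ++ c :: v).drop f).head? = some c := (pvSingleton_prefix c _).mp hpre
      rw [List.head?_drop] at h1
      rw [List.getElem?_append_left hlt] at h1
      exact h (List.mem_of_getElem? h1)
    · exact heq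
    · exfalso
      apply hmin u.length hgt
      rw [List.drop_left]
      exact (pvSingleton_prefix c _).mpr rfl
  omega



-- occurrences of a newline-free, nonempty needle in a ++ '\n' :: r never span the newline
theorem pvOccCases (s a r : List Char) (hs : s ≠ []) (hn : '\n' ∉ s)
    (j : Nat) (h : s <+: (a ++ '\n' :: r).drop j) :
    (j + s.length ≤ a.length ∧ s <+: a.drop j) ∨
      (a.length + 1 ≤ j ∧ s <+: r.drop (j - (a.length + 1))) := by
  have hs1 : 1 ≤ s.length := List.length_pos_iff.mpr hs
  by_cases hj : j + s.length ≤ a.length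
  · left
    refine ⟨hj, ?_⟩
    have hd : (a ++ '\n' :: r).drop j = a.drop j ++ '\n' :: r := by
      rw [List.drop_append]
      have : j - a.length = 0 := by omega
      rw [this, List.drop_zero]
    rw [hd] at h
    exact (List.isPrefix_append_of_length (by simp [List.length_drop]; omega)).mp h
  · by_cases hj2 : a.length + 1 ≤ j
    · right
      refine ⟨hj2, ?_⟩
      obtain ⟨k, hk⟩ : ∃ k, j - a.length = k + 1 := ⟨j - a.length - 1, by omega⟩
      have hd : (a ++ '\n' :: r).drop j = r.drop (j - (a.length + 1)) := by
        rw [List.drop_append]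
        rw [show a.drop j = ([] : List Char) from List.drop_eq_nil_of_le (by omega)]
        rw [hk, List.drop_succ_cons]
        have : k = j - (a.length + 1) := by omega
        rw [this]
        rfl
      rw [hd] at h
      exact h
    · exfalso
      apply hn
      obtain ⟨w, hw⟩ := h
      have hja : j ≤ a.length := by omega
      have hidx : a.length - j < s.length := by omega
      have h1 : ((a ++ '\n' :: r).drop j)[a.length - j]? = some '\n' := by
        rw [List.getElem?_drop]
        have : j + (a.length - j) = a.length := by omega
        rw [this]
        rw [List.getElem?_append_right (le_refl a.length)]
        simp
      rw [← hw] at h1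
      rw [List.getElem?_append_left hidx] at h1
      exact List.mem_of_getElem? h1



theorem pvOccLiftA (s a r : List Char) (hs : s ≠ []) (j : Nat) (h : s <+: a.drop j) :
    s <+: (a ++ '\n' :: r).drop j ∧ j + s.length ≤ a.length := by
  have hs1 : 1 ≤ s.length := List.length_pos_iff.mpr hs
  have hlen : s.length ≤ (a.drop j).length := h.length_le
  rw [List.length_drop] at hlen
  have hja : j + s.length ≤ a.length := by omega
  refine ⟨?_, hja⟩
  have hd : (a ++ '\n' :: r).drop j = a.drop j ++ '\n' :: r := by
    rw [List.drop_append]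
    have : j - a.length = 0 := by omega
    rw [this, List.drop_zero]
  rw [hd]
  exact List.prefix_append_of_prefix h



theorem pvDropShift (a r : List Char) (k : Nat) :
    (a ++ '\n' :: r).drop (a.length + 1 + k) = r.drop k := by
  have : a.length + 1 + k = a.length + (1 + k) := by omega
  rw [this, List.drop_append]
  have h2 : a.length + (1 + k) - a.length = k + 1 := by omega
  rw [show a.drop (a.length + (1 + k)) = ([] : List Char) from List.drop_eq_nil_of_le (by omega)]
  rw [h2, List.drop_succ_cons]
  rfl

theorem pvOccLiftR (s a r : List Char) (k : Nat) (h : s <+: r.drop k) :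
    s <+: (a ++ '\n' :: r).drop (a.length + 1 + k) := by
  rw [pvDropShift]
  exact h

theorem pvSpan (s a r : List Char) (hs : s ≠ []) (hn : '\n' ∉ s) :
    PySem.Chars.isIn s (a ++ '\n' :: r) = (PySem.Chars.isIn s a || PySem.Chars.isIn s r) := by
  rw [Bool.eq_iff_iff, Bool.or_eq_true]
  rw [← PySem.Chars.exists_prefix_drop_iff_isIn, ← PySem.Chars.exists_prefix_drop_iff_isIn,
    ← PySem.Chars.exists_prefix_drop_iff_isIn]
  constructor
  · rintro ⟨j, hj⟩
    rcases pvOccCases s a r hs hn j hj with ⟨_, hp⟩ | ⟨_, hp⟩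
    · exact Or.inl ⟨j, hp⟩
    · exact Or.inr ⟨j - (a.length + 1), hp⟩
  · rintro (⟨j, hj⟩ | ⟨k, hk⟩)
    · exact ⟨j, (pvOccLiftA s a r hs j hj).1⟩
    · exact ⟨a.length + 1 + k, pvOccLiftR s a r k hk⟩



theorem pvFindShift (s a r : List Char) (hs : s ≠ []) (hn : '\n' ∉ s)
    (ha : PySem.Chars.isIn s a = false) (hr : PySem.Chars.isIn s r = true) :
    PySem.Chars.find (a ++ '\n' :: r) s = (a.length : Int) + 1 + PySem.Chars.find r s := by
  have hrinf : s <:+: r := (PySem.Chars.isIn_iff_infix s r).mp hr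
  have hr0 : 0 ≤ PySem.Chars.find r s := (PySem.Chars.find_nonneg_iff r s).mpr hrinf
  obtain ⟨hpre_r, hmin_r⟩ := PySem.Chars.find_spec hr0
  set p2 := (PySem.Chars.find r s).toNat with hp2
  set F := a.length + 1 + p2 with hF
  have hprefF : s <+: (a ++ '\n' :: r).drop F := pvOccLiftR s a r p2 hpre_r
  have hminF : ∀ i < F, ¬ s <+: (a ++ '\n' :: r).drop i := by
    intro i hi hpre
    rcases pvOccCases s a r hs hn i hpre with ⟨_, hp⟩ | ⟨hge, hp⟩
    · have : PySem.Chars.isIn s a = true :=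
        (PySem.Chars.exists_prefix_drop_iff_isIn s a).mp ⟨i, hp⟩
      rw [this] at ha; exact Bool.true_eq_false.mp ha
    · exact hmin_r (i - (a.length + 1)) (by omega) hp
  have htinf : s <:+: a ++ '\n' :: r :=
    (PySem.Chars.isIn_iff_infix s (a ++ '\n' :: r)).mp
      ((PySem.Chars.exists_prefix_drop_iff_isIn s (a ++ '\n' :: r)).mp ⟨F, hprefF⟩)
  have ht0 : 0 ≤ PySem.Chars.find (a ++ '\n' :: r) s :=
    (PySem.Chars.find_nonneg_iff (a ++ '\n' :: r) s).mpr htinf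
  obtain ⟨hpre_t, hmin_t⟩ := PySem.Chars.find_spec ht0
  have heq : (PySem.Chars.find (a ++ '\n' :: r) s).toNat = F := by
    rcases Nat.lt_trichotomy (PySem.Chars.find (a ++ '\n' :: r) s).toNat F with hlt | heq | hgt
    · exact absurd hpre_t (hminF _ hlt)
    · exact heq
    · exact absurd hprefF (hmin_t F hgt)
  omega



theorem pvFindInA (s a r : List Char) (hs : s ≠ []) (hn : '\n' ∉ s)
    (ha : PySem.Chars.isIn s a = true) :
    0 ≤ PySem.Chars.find (a ++ '\n' :: r) s ∧
      (PySem.Chars.find (a ++ '\n' :: r) s).toNat + s.length ≤ a.length := by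
  obtain ⟨j0, hj0⟩ := (PySem.Chars.exists_prefix_drop_iff_isIn s a).mpr ha
  obtain ⟨hlift, hj0a⟩ := pvOccLiftA s a r hs j0 hj0
  have hs1 : 1 ≤ s.length := List.length_pos_iff.mpr hs
  have ht0 : 0 ≤ PySem.Chars.find (a ++ '\n' :: r) s := by
    rw [PySem.Chars.find_nonneg_iff]
    exact (PySem.Chars.isIn_iff_infix s (a ++ '\n' :: r)).mp
      ((PySem.Chars.exists_prefix_drop_iff_isIn s (a ++ '\n' :: r)).mp ⟨j0, hlift⟩)
  obtain ⟨hpre_t, hmin_t⟩ := PySem.Chars.find_spec ht0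
  refine ⟨ht0, ?_⟩
  have hle : (PySem.Chars.find (a ++ '\n' :: r) s).toNat ≤ j0 := by
    by_contra hgt
    exact hmin_t j0 (by omega) hlift
  rcases pvOccCases s a r hs hn _ hpre_t with ⟨hA, _⟩ | ⟨hR, _⟩
  · exact hA
  · omega



theorem pvNlComp (a r : List Char) (hna : '\n' ∉ a) (p : Nat) (hp : p ≤ a.length) :
    PySem.Chars.findFrom (a ++ '\n' :: r) ['\n'] (p : Int) none = (a.length : Int) := by
  have hk : p ≤ (a ++ '\n' :: r).length := by
    simp [List.length_append]; omega
  rw [PySem.Chars.findFrom_natCast (a ++ '\n' :: r) ['\n'] p hk]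
  have hd : (a ++ '\n' :: r).drop p = a.drop p ++ '\n' :: r := by
    rw [List.drop_append]
    have : p - a.length = 0 := by omega
    rw [this, List.drop_zero]
  have hnp : '\n' ∉ a.drop p := fun hm => hna (List.mem_of_mem_drop hm)
  rw [hd, pvFindChar '\n' (a.drop p) r hnp, List.length_drop]
  rw [if_neg (by omega)]
  omega



theorem pvSliceTake (t : List Char) (k : Nat) :
    PySem.List.slice t none (some (k : Int)) = t.take k := by
  simp [pysem]

-- the statement carried through the induction
def pvGoal (s t : List Char) : Prop :=
  (pvLoopA s (pvLines t) [] false).2 = PySem.Chars.isIn s t ∧ pvAOut s t = pvBOut s t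

theorem pvCaseNoNl (s t : List Char) (_hs : s ≠ []) (hm : '\n' ∉ t) : pvGoal s t := by
  have hL : pvLines t = [t] := pvLines_of_not_mem t hm
  by_cases hIn : PySem.Chars.isIn s t = true
  · have hpos0 : 0 ≤ PySem.Chars.find t s :=
      (PySem.Chars.find_nonneg_iff t s).mpr ((PySem.Chars.isIn_iff_infix s t).mp hIn)
    have hle : PySem.Chars.find t s ≤ (t.length : Int) := PySem.Chars.find_le_length t s
    have hcast : PySem.Chars.find t s = (((PySem.Chars.find t s).toNat : Nat) : Int) :=
      (Int.toNat_of_nonneg hpos0).symm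
    have hkk : (PySem.Chars.find t s).toNat ≤ t.length := by omega
    have hnone : PySem.Chars.find (t.drop (PySem.Chars.find t s).toNat) ['\n'] = -1 := by
      rw [PySem.Chars.find_eq_neg_one_iff]
      intro hinf
      exact hm (List.mem_of_mem_drop ((List.singleton_infix_iff '\n' _).mp hinf))
    have hnl : PySem.Chars.findFrom t ['\n'] (PySem.Chars.find t s) none = -1 := by
      rw [hcast, PySem.Chars.findFrom_natCast t ['\n'] _ hkk, hnone]
      simp
    constructor
    · rw [hL]; simp [pvLoopA, hIn]
    · have hA : pvAOut s t = t := by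
        unfold pvAOut
        rw [hL]
        simp [pvLoopA, hIn, PySem.Chars.join_singleton]
      have hB : pvBOut s t = t := by
        unfold pvBOut
        rw [if_neg (by omega : ¬ PySem.Chars.find t s = -1), hnl]
        simp
      rw [hA, hB]
  · rw [Bool.not_eq_true] at hIn
    have hres := pvLoopA_all_false s [t] []
      (by intro l hl; rw [List.mem_singleton] at hl; subst hl; exact hIn)
    have hf : PySem.Chars.find t s = -1 :=
      (PySem.Chars.find_eq_neg_one_iff t s).mpr ((PySem.Chars.isIn_eq_false_iff s t).mp hIn)
    constructor
    · rw [hL, hres, hIn]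
    · have hA : pvAOut s t = t := by
        unfold pvAOut
        rw [hL, hres]
        simp
      have hB : pvBOut s t = t := by
        unfold pvBOut
        rw [hf]
        simp
      rw [hA, hB]

theorem pvCaseA (s a r : List Char) (hs : s ≠ []) (hn : '\n' ∉ s) (hna : '\n' ∉ a)
    (ha : PySem.Chars.isIn s a = true) : pvGoal s (a ++ '\n' :: r) := by
  have hs1 : 1 ≤ s.length := List.length_pos_iff.mpr hs
  have hL : pvLines (a ++ '\n' :: r) = a :: pvLines r := pvLines_append a r hna
  have hInT : PySem.Chars.isIn s (a ++ '\n' :: r) = true := by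
    rw [pvSpan s a r hs hn, ha]; rfl
  obtain ⟨hpos0, hlen⟩ := pvFindInA s a r hs hn ha
  have hcast : PySem.Chars.find (a ++ '\n' :: r) s
      = (((PySem.Chars.find (a ++ '\n' :: r) s).toNat : Nat) : Int) :=
    (Int.toNat_of_nonneg hpos0).symm
  have hnl : PySem.Chars.findFrom (a ++ '\n' :: r) ['\n']
      (PySem.Chars.find (a ++ '\n' :: r) s) none = (a.length : Int) := by
    rw [hcast]
    exact pvNlComp a r hna _ (by omega)
  constructor
  · rw [hL]; simp [pvLoopA, ha, hInT]
  · have hA : pvAOut s (a ++ '\n' :: r) = a := by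
      unfold pvAOut
      rw [hL]
      simp [pvLoopA, ha, PySem.Chars.join_singleton]
    have hB : pvBOut s (a ++ '\n' :: r) = a := by
      unfold pvBOut
      rw [if_neg (by omega : ¬ PySem.Chars.find (a ++ '\n' :: r) s = -1), hnl]
      rw [if_neg (by omega : ¬ (a.length : Int) = -1)]
      rw [pvSliceTake]
      exact List.take_left
    rw [hA, hB]

theorem pvCaseR (s a r : List Char) (hs : s ≠ []) (hn : '\n' ∉ s) (hna : '\n' ∉ a)
    (ha : PySem.Chars.isIn s a = false) (IHr : pvGoal s r) : pvGoal s (a ++ '\n' :: r) := by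
  obtain ⟨IH1, IH2⟩ := IHr
  have hL : pvLines (a ++ '\n' :: r) = a :: pvLines r := pvLines_append a r hna
  have hSpan : PySem.Chars.isIn s (a ++ '\n' :: r) = PySem.Chars.isIn s r := by
    rw [pvSpan s a r hs hn, ha]; rfl
  have hstep : pvLoopA s (a :: pvLines r) [] false
      = ([a] ++ (pvLoopA s (pvLines r) [] false).1, (pvLoopA s (pvLines r) [] false).2) := by
    have h1 : pvLoopA s (a :: pvLines r) [] false = pvLoopA s (pvLines r) [a] false := by
      simp [pvLoopA, ha]
    rw [h1, pvLoopA_acc]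
  constructor
  · rw [hL, hstep, hSpan, ← IH1]
  · by_cases hr : PySem.Chars.isIn s r = true
    · have hX2 : (pvLoopA s (pvLines r) [] false).2 = true := by rw [IH1, hr]
      obtain ⟨x, xs, hXcons⟩ : ∃ x xs, (pvLoopA s (pvLines r) [] false).1 = x :: xs := by
        cases e : (pvLoopA s (pvLines r) [] false).1 with
        | nil => exact absurd e (pvLoopA_fst_ne_nil s (pvLines r) [] hX2)
        | cons x xs => exact ⟨x, xs, rfl⟩
      have hAr : PySem.Chars.join ['\n'] (pvLoopA s (pvLines r) [] false).1 = pvBOut s r := by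
        rw [← IH2]
        unfold pvAOut
        rw [hX2]
        simp
      have hA : pvAOut s (a ++ '\n' :: r)
          = a ++ '\n' :: PySem.Chars.join ['\n'] (pvLoopA s (pvLines r) [] false).1 := by
        unfold pvAOut
        rw [hL, hstep, hXcons]
        simp [hX2, PySem.Chars.join_cons_cons]
      -- B side
      have hr0 : 0 ≤ PySem.Chars.find r s :=
        (PySem.Chars.find_nonneg_iff r s).mpr ((PySem.Chars.isIn_iff_infix s r).mp hr)
      have hshift : PySem.Chars.find (a ++ '\n' :: r) s
          = (a.length : Int) + 1 + PySem.Chars.find r s := pvFindShift s a r hs hn ha hr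
      have hPle : (PySem.Chars.find r s).toNat ≤ r.length := by
        have := PySem.Chars.find_le_length r s; omega
      have hprc : PySem.Chars.find r s = (((PySem.Chars.find r s).toNat : Nat) : Int) :=
        (Int.toNat_of_nonneg hr0).symm
      have hlen_t : (a ++ '\n' :: r).length = a.length + 1 + r.length := by
        simp [List.length_append]; omega
      have hkt : a.length + 1 + (PySem.Chars.find r s).toNat ≤ (a ++ '\n' :: r).length := by
        omega
      have hft : PySem.Chars.find (a ++ '\n' :: r) s
          = ((a.length + 1 + (PySem.Chars.find r s).toNat : Nat) : Int) := by
        rw [hshift]; omega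
      have hdrop : (a ++ '\n' :: r).drop (a.length + 1 + (PySem.Chars.find r s).toNat)
          = r.drop (PySem.Chars.find r s).toNat := pvDropShift a r _
      have hnlt : PySem.Chars.findFrom (a ++ '\n' :: r) ['\n']
          (PySem.Chars.find (a ++ '\n' :: r) s) none
          = if PySem.Chars.find (r.drop (PySem.Chars.find r s).toNat) ['\n'] = -1 then -1
            else ((a.length + 1 + (PySem.Chars.find r s).toNat : Nat) : Int)
              + PySem.Chars.find (r.drop (PySem.Chars.find r s).toNat) ['\n'] := by
        rw [hft, PySem.Chars.findFrom_natCast _ _ _ hkt, hdrop]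
      have hnlr : PySem.Chars.findFrom r ['\n'] (PySem.Chars.find r s) none
          = if PySem.Chars.find (r.drop (PySem.Chars.find r s).toNat) ['\n'] = -1 then -1
            else (((PySem.Chars.find r s).toNat : Nat) : Int)
              + PySem.Chars.find (r.drop (PySem.Chars.find r s).toNat) ['\n'] := by
        conv_lhs => rw [hprc]
        rw [PySem.Chars.findFrom_natCast r _ _ hPle]
      have hg1 : -1 ≤ PySem.Chars.find (r.drop (PySem.Chars.find r s).toNat) ['\n'] :=
        PySem.Chars.neg_one_le_find _ _
      by_cases hgm : PySem.Chars.find (r.drop (PySem.Chars.find r s).toNat) ['\n'] = -1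
      · have hBt : pvBOut s (a ++ '\n' :: r) = a ++ '\n' :: r := by
          unfold pvBOut
          rw [if_neg (by rw [hft]; omega), hnlt, if_pos hgm]
          simp
        have hBr : pvBOut s r = r := by
          unfold pvBOut
          rw [if_neg (by omega : ¬ PySem.Chars.find r s = -1), hnlr, if_pos hgm]
          simp
        rw [hA, hAr, hBr, hBt]
      · have hg0 : 0 ≤ PySem.Chars.find (r.drop (PySem.Chars.find r s).toNat) ['\n'] := by omega
        have hBr : pvBOut s r
            = r.take ((PySem.Chars.find r s).toNat
                + (PySem.Chars.find (r.drop (PySem.Chars.find r s).toNat) ['\n']).toNat) := by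
          unfold pvBOut
          rw [if_neg (by omega : ¬ PySem.Chars.find r s = -1), hnlr, if_neg hgm]
          rw [if_neg (by omega)]
          rw [show (((PySem.Chars.find r s).toNat : Nat) : Int)
                + PySem.Chars.find (r.drop (PySem.Chars.find r s).toNat) ['\n']
              = (((PySem.Chars.find r s).toNat
                  + (PySem.Chars.find (r.drop (PySem.Chars.find r s).toNat) ['\n']).toNat : Nat) : Int)
            from by push_cast; omega]
          rw [pvSliceTake]
        have hBt : pvBOut s (a ++ '\n' :: r)
            = a ++ '\n' :: r.take ((PySem.Chars.find r s).toNat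
                + (PySem.Chars.find (r.drop (PySem.Chars.find r s).toNat) ['\n']).toNat) := by
          unfold pvBOut
          rw [if_neg (by rw [hft]; omega), hnlt, if_neg hgm]
          rw [if_neg (by omega)]
          rw [show ((a.length + 1 + (PySem.Chars.find r s).toNat : Nat) : Int)
                + PySem.Chars.find (r.drop (PySem.Chars.find r s).toNat) ['\n']
              = ((a.length + ((PySem.Chars.find r s).toNat
                  + (PySem.Chars.find (r.drop (PySem.Chars.find r s).toNat) ['\n']).toNat + 1) : Nat) : Int)
            from by push_cast; omega]
          rw [pvSliceTake, List.take_length_add_append, List.take_succ_cons]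
        rw [hA, hAr, hBr, hBt]
    · rw [Bool.not_eq_true] at hr
      have hX2 : (pvLoopA s (pvLines r) [] false).2 = false := by rw [IH1, hr]
      have hInT : PySem.Chars.isIn s (a ++ '\n' :: r) = false := by rw [hSpan]; exact hr
      have hf : PySem.Chars.find (a ++ '\n' :: r) s = -1 :=
        (PySem.Chars.find_eq_neg_one_iff _ _).mpr ((PySem.Chars.isIn_eq_false_iff _ _).mp hInT)
      have hA : pvAOut s (a ++ '\n' :: r) = a ++ '\n' :: r := by
        unfold pvAOut
        rw [hL, hstep]
        simp [hX2]
      have hB : pvBOut s (a ++ '\n' :: r) = a ++ '\n' :: r := by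
        unfold pvBOut
        rw [hf]
        simp
      rw [hA, hB]

-- the master equivalence, by strong induction on the length of t
theorem pvMaster (s : List Char) (hs : s ≠ []) (hn : '\n' ∉ s) :
    ∀ (n : Nat) (t : List Char), t.length ≤ n → pvGoal s t := by
  intro n
  induction n with
  | zero =>
    intro t ht
    have ht0 : t = [] := List.eq_nil_of_length_eq_zero (Nat.le_zero.mp ht)
    subst ht0
    exact pvCaseNoNl s [] hs (by simp)
  | succ n IH =>
    intro t ht
    by_cases hm : '\n' ∈ t
    · have hdne : t.dropWhile (fun c => c != '\n') ≠ [] := by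
        intro hdnil
        have hta : t = t.takeWhile (fun c => c != '\n') := by
          conv_lhs => rw [← List.takeWhile_append_dropWhile (p := fun c => c != '\n') (l := t)]
          rw [hdnil, List.append_nil]
        have hmem : '\n' ∈ t.takeWhile (fun c => c != '\n') := hta ▸ hm
        have := List.mem_takeWhile_imp hmem
        simp at this
      have hhead : (t.dropWhile (fun c => c != '\n')).head hdne = '\n' := by
        have := List.head_dropWhile_not (fun c => c != '\n') hdne
        simpa using this
      obtain ⟨c, d', e⟩ := List.exists_cons_of_ne_nil hdne
      have hc : c = '\n' := by
        have h1 : (t.dropWhile (fun c => c != '\n')).head? = some c := by rw [e]; rfl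
        rw [List.head?_eq_some_head hdne, hhead] at h1
        exact (Option.some_inj.mp h1).symm
      have hna : '\n' ∉ t.takeWhile (fun c => c != '\n') := by
        intro hmem
        have := List.mem_takeWhile_imp hmem
        simp at this
      have hteq : t = t.takeWhile (fun c => c != '\n') ++ '\n' :: d' := by
        conv_lhs => rw [← List.takeWhile_append_dropWhile (p := fun c => c != '\n') (l := t)]
        rw [e, hc]
      have hlen : d'.length ≤ n := by
        have h1 : t.length = (t.takeWhile (fun c => c != '\n')).length + (1 + d'.length) := by
          conv_lhs => rw [hteq]
          simp [List.length_append]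
          omega
        omega
      rw [hteq]
      by_cases hA : PySem.Chars.isIn s (t.takeWhile (fun c => c != '\n')) = true
      · exact pvCaseA s _ _ hs hn hna hA
      · rw [Bool.not_eq_true] at hA
        exact pvCaseR s _ _ hs hn hna hA (IH _ hlen)
    · exact pvCaseNoNl s t hs hm

theorem pvPortA_eq (transcription start_time : String)
    (h : start_time.toList.isEmpty = false) :
    remove_time_from_transcription transcription start_time
      = String.ofList (pvAOut start_time.toList transcription.toList) := by
  unfold remove_time_from_transcription pvAOut
  simp only [h, Bool.false_eq_true, if_false, pvSplitOn_eq_pvLines]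
  split_ifs
  · exact String.ofList_toList.symm
  · rfl

theorem pvPortB_eq (transcription start_time : String)
    (h1 : start_time.toList.isEmpty = false)
    (h2 : PySem.Chars.isIn ['\n'] start_time.toList = false) :
    remove_time_from_transcription_alt transcription start_time
      = String.ofList (pvBOut start_time.toList transcription.toList) := by
  unfold remove_time_from_transcription_alt pvBOut
  simp only [h1, h2, Bool.or_self, Bool.false_eq_true, if_false]
  split_ifs
  · exact String.ofList_toList.symm
  · exact String.ofList_toList.symm
  · rfl

-- ===== VERDICT (by name: the statement is the Claim_ definition above) =====
theorem remove_time_from_transcription_spec : Claim_equal_remove_time_from_transcription := by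
  unfold Claim_equal_remove_time_from_transcription Spec_remove_time_from_transcription
  intro transcription start_time _
  by_cases hse : start_time.toList.isEmpty = true
  · unfold remove_time_from_transcription remove_time_from_transcription_alt
    simp [hse]
  · have hse' : start_time.toList.isEmpty = false := by rwa [Bool.not_eq_true] at hse
    have hsne : start_time.toList ≠ [] := by simpa [List.isEmpty_iff] using hse
    by_cases hnl : PySem.Chars.isIn ['\n'] start_time.toList = true
    · have hBt : remove_time_from_transcription_alt transcription start_time = transcription := by
        unfold remove_time_from_transcription_alt
        simp [hse', hnl]
      have hmem : '\n' ∈ start_time.toList :=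
        (List.singleton_infix_iff '\n' start_time.toList).mp
          ((PySem.Chars.isIn_iff_infix ['\n'] start_time.toList).mp hnl)
      have hall : ∀ l ∈ pvLines transcription.toList,
          PySem.Chars.isIn start_time.toList l = false := by
        intro l hl
        rw [PySem.Chars.isIn_eq_false_iff]
        intro hinf
        exact pvLines_no_nl transcription.toList l hl (hinf.subset hmem)
      have hAt : remove_time_from_transcription transcription start_time = transcription := by
        unfold remove_time_from_transcription
        simp only [hse', Bool.false_eq_true, if_false, pvSplitOn_eq_pvLines]
        rw [pvLoopA_all_false start_time.toList _ [] hall]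
        simp
      rw [hAt, hBt]
    · have hnm : '\n' ∉ start_time.toList := by
        intro hmem
        exact hnl ((PySem.Chars.isIn_iff_infix _ _).mpr
          ((List.singleton_infix_iff _ _).mpr hmem))
      obtain ⟨_, hout⟩ := pvMaster start_time.toList hsne hnm
        transcription.toList.length transcription.toList le_rfl
      rw [pvPortA_eq transcription start_time hse',
        pvPortB_eq transcription start_time hse' (by rwa [Bool.not_eq_true] at hnl), hout]
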